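-- pv_equiv track=rewrite | github.com/kshitijgorde/PhishingURLDetectionUsingOversampling | LoadCSVDataset.py | cleanDataset
-- ===== SOURCE A (Python) =====
-- def cleanDataset(columns,header):
--     'This method receives the Dataset and deletes the URLs for which reported/total cases is N/A'
--     for (k,v) in columns.items():
--         if k == 'Positive':
--             indexes = [i for i, x in enumerate(v) if x  == 'N/A'] #get indexes for N/A values
--             for i in sorted(indexes,reverse=True):
--                 # #delete the entire row
--                 del columns[header[0]][i]
--                 del columns[header[1]][i]
--                 del columns[header[2]][i]
--     return columns
-- ===== SOURCE B (Python) =====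
-- def cleanDataset(columns, header):
--     'Row-major rewrite: filter rows where Positive == "N/A" and transpose back (mutates columns like A).'
--     if 'Positive' not in columns:
--         return columns
--     p = columns['Positive']
--     if 'N/A' not in p:
--         return columns
--     h0, h1, h2 = header[0], header[1], header[2]
--     kept = [row for row in zip(columns[h0], columns[h1], columns[h2], p) if row[3] != 'N/A']
--     columns[h0] = [r[0] for r in kept]
--     columns[h1] = [r[1] for r in kept]
--     columns[h2] = [r[2] for r in kept]
--     return columns
-- ===== Notes on version B (the rewrite author's own statement) =====
-- stated objective: alternative
-- what changed: Replaces A's collect-N/A-indexes-then-delete-in-reverse-per-column loop by a row-major filter-and-transpose: zip the three target columns with the Positive column, keep rows whose Positive value is not 'N/A', and assign the unzipped survivors back.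
import Mathlib
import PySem

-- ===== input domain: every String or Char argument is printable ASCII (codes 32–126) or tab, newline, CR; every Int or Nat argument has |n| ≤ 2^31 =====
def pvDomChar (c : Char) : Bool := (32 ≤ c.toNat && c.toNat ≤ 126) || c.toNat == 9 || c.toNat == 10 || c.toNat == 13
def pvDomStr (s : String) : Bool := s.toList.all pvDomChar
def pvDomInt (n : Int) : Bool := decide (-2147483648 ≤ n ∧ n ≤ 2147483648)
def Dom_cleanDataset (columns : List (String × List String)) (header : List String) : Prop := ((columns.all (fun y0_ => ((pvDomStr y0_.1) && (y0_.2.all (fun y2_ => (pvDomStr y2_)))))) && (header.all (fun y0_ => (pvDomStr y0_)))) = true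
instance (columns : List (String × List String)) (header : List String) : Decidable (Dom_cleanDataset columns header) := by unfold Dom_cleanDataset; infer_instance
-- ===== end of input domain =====

-- B is a row-major filter-and-transpose instead of A's index-collect-and-delete; equivalence is about the
-- RETURN value only (both Pythons also mutate `columns` in place: A edits the lists, B rebinds the keys).

-- ===== PORT A =====
-- first-match value update of the association-list dict (Python: `del columns[k][i]` mutates the stored list)
def dictModify (cols : List (String × List String)) (k : String) (f : List String → List String) : List (String × List String) :=
  match cols with
  | [] => []
  | (k', v) :: t => if k' = k then (k', f v) :: t else (k', v) :: dictModify t k f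

def cleanDataset (columns : List (String × List String)) (header : List String) : List (String × List String) :=
  columns.foldl (fun cols kv =>
    if kv.1 == "Positive" then
      let indexes := ((PySem.List.enumerate kv.2).filter (fun q => q.2 == "N/A")).map (fun q => q.1)
      (PySem.List.sorted indexes (fun i => i) true).foldl (fun cols i =>
        -- header[0..2] raise IndexError when header is too short; those inputs are outside Pre_
        let cols := dictModify cols (header.getD 0 "") (fun l => l.eraseIdx i.toNat)
        let cols := dictModify cols (header.getD 1 "") (fun l => l.eraseIdx i.toNat)
        dictModify cols (header.getD 2 "") (fun l => l.eraseIdx i.toNat)) cols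
    else cols) columns

-- ===== PORT B =====
-- Python dict assignment: overwrite the first-match entry in place, append when the key is new
def dictSet (cols : List (String × List String)) (k : String) (w : List String) : List (String × List String) :=
  match cols with
  | [] => [(k, w)]
  | (k', v) :: t => if k' = k then (k', w) :: t else (k', v) :: dictSet t k w

def cleanDataset_alt (columns : List (String × List String)) (header : List String) : List (String × List String) :=
  match columns.lookup "Positive" with
  | none => columns
  | some p =>
    if "N/A" ∈ p then
      let h0 := header.getD 0 ""
      let h1 := header.getD 1 ""
      let h2 := header.getD 2 ""
      let kept := ((((columns.lookup h0).getD []).zip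
                    ((((columns.lookup h1).getD [])).zip
                     ((((columns.lookup h2).getD [])).zip p)))).filter
                   (fun r => r.2.2.2 != "N/A")
      let cols := dictSet columns h0 (kept.map (fun r => r.1))
      let cols := dictSet cols h1 (kept.map (fun r => r.2.1))
      dictSet cols h2 (kept.map (fun r => r.2.2.1))
    else columns

-- ===== PRECONDITION & SPEC =====
-- does column h exist with exactly n entries?
def colOK (columns : List (String × List String)) (n : Nat) (h : String) : Bool :=
  match columns.lookup h with
  | some c => c.length == n
  | none => false

-- Pre_ excludes (a) assoc lists with duplicate keys (not a Python dict), and, when a row actually gets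
-- deleted, (b) header shorter than 3 or naming a missing column (A raises IndexError/KeyError),
-- (c) duplicate names among header[0..2] and (d) target columns whose length differs from the Positive
-- column's — on (c)/(d) A's per-index deletion hits shifted or leftover cells, an accident of its
-- implementation that is as unspecifiable as B's zip truncation (see cites).
def preCheck (columns : List (String × List String)) (header : List String) : Bool :=
  decide (columns.map Prod.fst).Nodup &&
  (match columns.lookup "Positive" with
   | none => true
   | some p =>
     !(p.contains "N/A") ||
     (decide (3 ≤ header.length) &&
      (header.getD 0 "" != header.getD 1 "") && (header.getD 0 "" != header.getD 2 "") &&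
      (header.getD 1 "" != header.getD 2 "") &&
      colOK columns p.length (header.getD 0 "") &&
      colOK columns p.length (header.getD 1 "") &&
      colOK columns p.length (header.getD 2 "")))

def Pre_cleanDataset (columns : List (String × List String)) (header : List String) : Prop :=
  preCheck columns header = true

instance (columns : List (String × List String)) (header : List String) : Decidable (Pre_cleanDataset columns header) := by
  unfold Pre_cleanDataset; infer_instance

def pvWitness_cleanDataset : (List (String × List String)) × List String :=
  ([("Url", ["u1", "u2"]), ("Cnt", ["1", "2"]), ("Positive", ["N/A", "3"])], ["Url", "Cnt", "Positive"])

def Spec_cleanDataset (columns : List (String × List String)) (header : List String) (out : List (String × List String)) : Prop := out = cleanDataset_alt columns header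
instance (columns : List (String × List String)) (header : List String) (out : List (String × List String)) : Decidable (Spec_cleanDataset columns header out) := by unfold Spec_cleanDataset; infer_instance

-- ===== CLAIM (what is proved, stated in full; the proofs are below) =====
def Claim_equal_cleanDataset : Prop := ∀ (columns : List (String × List String)) (header : List String), Dom_cleanDataset columns header → Pre_cleanDataset columns header → Spec_cleanDataset columns header (cleanDataset columns header)

-- ===== LEMMAS AND PROOFS =====

-- the values kept from l at the positions where p is not "N/A"
def sel (l p : List String) : List String :=
  (l.zip p).filterMap (fun ab => if ab.2 = "N/A" then none else some ab.1)

-- the (increasing) positions of "N/A" in p, starting at s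
def idxInt (p : List String) (s : Int) : List Int :=
  match p with
  | [] => []
  | x :: t => (if x = "N/A" then [s] else []) ++ idxInt t (s + 1)

theorem lookup_split {β : Type} (l : List (String × β)) (k : String) (v : β)
    (h : l.lookup k = some v) :
    ∃ l1 l2, l = l1 ++ (k, v) :: l2 ∧ ∀ kv ∈ l1, kv.1 ≠ k := by
  induction l with
  | nil => simp [List.lookup] at h
  | cons hd t ih =>
    obtain ⟨k0, v0⟩ := hd
    rw [List.lookup] at h
    by_cases hk : k = k0
    · subst hk
      simp at h
      subst h
      exact ⟨[], t, rfl, by simp⟩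
    · rw [show (k == k0) = false from beq_eq_false_iff_ne.mpr hk] at h
      obtain ⟨l1, l2, rfl, hno⟩ := ih h
      refine ⟨(k0, v0) :: l1, l2, rfl, ?_⟩
      intro kv hkv
      rcases List.mem_cons.mp hkv with h' | h'
      · subst h'; exact fun hc => hk hc.symm
      · exact hno kv h'

theorem lookup_none {β : Type} (l : List (String × β)) (k : String)
    (h : l.lookup k = none) : ∀ kv ∈ l, kv.1 ≠ k := by
  induction l with
  | nil => simp
  | cons hd t ih =>
    obtain ⟨k0, v0⟩ := hd
    rw [List.lookup] at h
    by_cases hk : k = k0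
    · subst hk; simp at h
    · rw [show (k == k0) = false from beq_eq_false_iff_ne.mpr hk] at h
      intro kv hkv
      rcases List.mem_cons.mp hkv with h' | h'
      · subst h'; exact fun hc => hk hc.symm
      · exact ih h kv h'

theorem dictModify_comm (c : List (String × List String)) (k k' : String)
    (f g : List String → List String) (h : k ≠ k') :
    dictModify (dictModify c k f) k' g = dictModify (dictModify c k' g) k f := by
  induction c with
  | nil => rfl
  | cons hd t ih =>
    obtain ⟨k0, v0⟩ := hd
    by_cases h0 : k0 = k
    · subst h0
      have h1 : ¬ (k0 = k') := h
      simp [dictModify, h1]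
    · by_cases h1 : k0 = k'
      · subst h1
        simp [dictModify, h0]
      · simp [dictModify, h0, h1, ih]

theorem dictModify_dictModify (c : List (String × List String)) (k : String)
    (f g : List String → List String) :
    dictModify (dictModify c k f) k g = dictModify c k (fun l => g (f l)) := by
  induction c with
  | nil => rfl
  | cons hd t ih =>
    obtain ⟨k0, v0⟩ := hd
    by_cases h0 : k0 = k
    · subst h0; simp [dictModify]
    · simp [dictModify, h0, ih]

theorem dictModify_eq_dictSet (c : List (String × List String)) (k : String)
    (f : List String → List String) (v : List String) (h : c.lookup k = some v) :
    dictModify c k f = dictSet c k (f v) := by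
  induction c with
  | nil => simp [List.lookup] at h
  | cons hd t ih =>
    obtain ⟨k0, v0⟩ := hd
    rw [List.lookup] at h
    by_cases h0 : k0 = k
    · subst h0
      simp at h
      subst h
      simp [dictModify, dictSet]
    · rw [show (k == k0) = false from beq_eq_false_iff_ne.mpr (fun hc => h0 hc.symm)] at h
      simp [dictModify, dictSet, h0, ih h]

theorem lookup_dictSet_ne (c : List (String × List String)) (k k' : String)
    (w : List String) (h : k' ≠ k) : (dictSet c k w).lookup k' = c.lookup k' := by
  induction c with
  | nil =>
    simp [dictSet, List.lookup, show (k' == k) = false from beq_eq_false_iff_ne.mpr h]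
  | cons hd t ih =>
    obtain ⟨k0, v0⟩ := hd
    by_cases h0 : k0 = k
    · subst h0
      simp [dictSet, List.lookup, show (k' == k0) = false from beq_eq_false_iff_ne.mpr h]
    · by_cases h1 : k' = k0
      · subst h1; simp [dictSet, List.lookup, h0]
      · simp [dictSet, List.lookup, h0,
          show (k' == k0) = false from beq_eq_false_iff_ne.mpr h1, ih]

theorem dictModify_id (c : List (String × List String)) (k : String) :
    dictModify c k (fun l => l) = c := by
  induction c with
  | nil => rfl
  | cons hd t ih => obtain ⟨k0, v0⟩ := hd; by_cases h : k0 = k <;> simp [dictModify, h, ih]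

-- proof-side names for A's two loop bodies (definitionally the port's lambdas)
def step3 (header : List String) (cols : List (String × List String)) (i : Int) : List (String × List String) :=
  dictModify (dictModify (dictModify cols (header.getD 0 "") (fun l => l.eraseIdx i.toNat))
    (header.getD 1 "") (fun l => l.eraseIdx i.toNat)) (header.getD 2 "") (fun l => l.eraseIdx i.toNat)

def stepA (header : List String) (cols : List (String × List String)) (kv : String × List String) : List (String × List String) :=
  if kv.1 == "Positive" then
    (PySem.List.sorted (((PySem.List.enumerate kv.2).filter (fun q => q.2 == "N/A")).map (fun q => q.1)) (fun i => i) true).foldl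
      (step3 header) cols
  else cols

-- A's inner loop over the reverse-sorted indexes, rewritten key by key
theorem fold3 (header : List String)
    (d01 : header.getD 0 "" ≠ header.getD 1 "") (d02 : header.getD 0 "" ≠ header.getD 2 "")
    (d12 : header.getD 1 "" ≠ header.getD 2 "")
    (I : List Int) (s : List (String × List String)) :
    I.foldl (step3 header) s =
    dictModify (dictModify (dictModify s (header.getD 0 "")
        (fun l => I.foldl (fun l i => l.eraseIdx i.toNat) l)) (header.getD 1 "")
        (fun l => I.foldl (fun l i => l.eraseIdx i.toNat) l)) (header.getD 2 "")
        (fun l => I.foldl (fun l i => l.eraseIdx i.toNat) l) := by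
  induction I generalizing s with
  | nil => simp [dictModify_id]
  | cons i I ih =>
    simp only [List.foldl_cons]
    rw [show step3 header s i = dictModify (dictModify (dictModify s (header.getD 0 "") (fun l => l.eraseIdx i.toNat))
      (header.getD 1 "") (fun l => l.eraseIdx i.toNat)) (header.getD 2 "") (fun l => l.eraseIdx i.toNat) from rfl]
    rw [ih]
    rw [dictModify_comm _ (header.getD 2 "") (header.getD 0 "") _ _ (Ne.symm d02),
        dictModify_comm _ (header.getD 1 "") (header.getD 0 "") _ _ (Ne.symm d01),
        dictModify_dictModify,
        dictModify_comm _ (header.getD 2 "") (header.getD 1 "") _ _ (Ne.symm d12),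
        dictModify_dictModify,
        dictModify_dictModify]

theorem foldl_skip (header : List String) (items : List (String × List String))
    (s : List (String × List String))
    (h : ∀ kv ∈ items, kv.1 ≠ "Positive") :
    items.foldl (stepA header) s = s := by
  induction items generalizing s with
  | nil => rfl
  | cons hd t ih =>
    have h1 : (hd.1 == "Positive") = false := beq_eq_false_iff_ne.mpr (h hd (by simp))
    rw [List.foldl_cons, show stepA header s hd = s by simp [stepA, h1]]
    exact ih _ (fun kv hkv => h kv (by simp [hkv]))

-- the sorted(reverse=True) of the strictly increasing index list is its reverse
theorem sorted_rev_idx (v : List String) :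
    PySem.List.sorted (((PySem.List.enumerate v).filter (fun q => q.2 == "N/A")).map (fun q => q.1)) (fun i => i) true =
    (((PySem.List.enumerate v).filter (fun q => q.2 == "N/A")).map (fun q => q.1)).reverse := by
  apply PySem.List.sorted_rev_eq_of_perm_of_pairwise_gt
  · exact (List.reverse_perm _)
  · rw [List.pairwise_reverse]
    have h := PySem.List.pairwise_lt_enumerate (xs := v) (s := 0)
    exact List.Pairwise.map _ (fun a b hab => hab) ((h.filter _).imp (fun hab => hab))

-- enumerate's filtered "N/A" indexes, structurally
theorem idx_enum (v : List String) (s : Int) :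
    ((PySem.List.enumerate v s).filter (fun q => q.2 == "N/A")).map (fun q => q.1) =
    idxInt v s := by
  induction v generalizing s with
  | nil => simp [PySem.List.enumerate_nil, idxInt]
  | cons x t ih =>
    rw [PySem.List.enumerate_cons, List.filter_cons]
    by_cases hx : x = "N/A"
    · subst hx
      simp [idxInt, ih (s + 1)]
    · simp [idxInt, hx, ih (s + 1)]

theorem idxInt_shift (p : List String) (s : Int) :
    idxInt p (s + 1) = (idxInt p s).map (· + 1) := by
  induction p generalizing s with
  | nil => simp [idxInt]
  | cons x t ih =>
    by_cases hx : x = "N/A" <;> simp [idxInt, hx, ih (s + 1)]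

theorem idxInt_ge (p : List String) (s : Int) : ∀ i ∈ idxInt p s, s ≤ i := by
  induction p generalizing s with
  | nil => simp [idxInt]
  | cons x t ih =>
    intro i hi
    rw [idxInt] at hi
    rcases List.mem_append.mp hi with h' | h'
    · by_cases hx : x = "N/A" <;> simp [hx] at h'
      omega
    · have := ih (s + 1) i h'
      omega

theorem eraseIdx_foldr_succ (ns : List Int) (hns : ∀ i ∈ ns, 0 ≤ i) (a : String) (l : List String) :
    ns.foldr (fun i l => l.eraseIdx (i + 1).toNat) (a :: l) =
    a :: ns.foldr (fun i l => l.eraseIdx i.toNat) l := by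
  induction ns with
  | nil => rfl
  | cons n t ih =>
    have hn : 0 ≤ n := hns n (by simp)
    have ht : ∀ i ∈ t, (0:Int) ≤ i := fun i hi => hns i (by simp [hi])
    rw [List.foldr_cons, List.foldr_cons, ih ht]
    have : (n + 1).toNat = n.toNat + 1 := by omega
    rw [this, List.eraseIdx_cons_succ]

theorem intCore (p l : List String) (h : l.length = p.length) :
    (idxInt p 0).foldr (fun i l => l.eraseIdx i.toNat) l = sel l p := by
  induction p generalizing l with
  | nil =>
    cases l with
    | nil => simp [idxInt, sel]
    | cons a l => simp at h
  | cons x t ih =>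
    cases l with
    | nil => simp at h
    | cons a l =>
      have hl : l.length = t.length := by simpa using h
      rw [idxInt, List.foldr_append]
      rw [show idxInt t ((0:Int) + 1) = (idxInt t 0).map (· + 1) from idxInt_shift t 0, List.foldr_map]
      rw [eraseIdx_foldr_succ _ (idxInt_ge t 0), ih l hl]
      by_cases hx : x = "N/A"
      · subst hx; simp [sel]
      · simp [sel, hx]

-- core: A's reverse-order deletions compute exactly the filtered column
theorem core (p l : List String) (h : l.length = p.length) :
    ((((PySem.List.enumerate p).filter (fun q => q.2 == "N/A")).map (fun q => q.1)).reverse).foldl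
      (fun l i => l.eraseIdx i.toNat) l = sel l p := by
  rw [List.foldl_reverse, idx_enum p 0]
  exact intCore p l h

-- B's three unzip projections coincide with the per-column selection
theorem proj_sel (c0 c1 c2 p : List String)
    (l0 : c0.length = p.length) (l1 : c1.length = p.length) (l2 : c2.length = p.length) :
    (((c0.zip (c1.zip (c2.zip p))).filter (fun r => r.2.2.2 != "N/A")).map (fun r => r.1) = sel c0 p) ∧
    (((c0.zip (c1.zip (c2.zip p))).filter (fun r => r.2.2.2 != "N/A")).map (fun r => r.2.1) = sel c1 p) ∧
    (((c0.zip (c1.zip (c2.zip p))).filter (fun r => r.2.2.2 != "N/A")).map (fun r => r.2.2.1) = sel c2 p) := by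
  induction p generalizing c0 c1 c2 with
  | nil =>
    cases c0 with
    | nil => simp [sel]
    | cons a t => simp at l0
  | cons x p ih =>
    cases c0 with
    | nil => simp at l0
    | cons a0 c0 =>
      cases c1 with
      | nil => simp at l1
      | cons a1 c1 =>
        cases c2 with
        | nil => simp at l2
        | cons a2 c2 =>
          have h0 : c0.length = p.length := by simpa using l0
          have h1 : c1.length = p.length := by simpa using l1
          have h2 : c2.length = p.length := by simpa using l2
          obtain ⟨e0, e1, e2⟩ := ih c0 c1 c2 h0 h1 h2
          by_cases hx : x = "N/A"
          · subst hx
            simp [sel, e0, e1, e2]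
          · simp [sel, hx, e0, e1, e2]

theorem colOK_spec (c : List (String × List String)) (n : Nat) (h : String)
    (hc : colOK c n h = true) : ∃ l, c.lookup h = some l ∧ l.length = n := by
  unfold colOK at hc
  cases hl : c.lookup h with
  | none => rw [hl] at hc; simp at hc
  | some l => rw [hl] at hc; simp at hc; exact ⟨l, rfl, hc⟩

theorem filter_nil_of_no_na (p : List String) (hna : "N/A" ∉ p) (s : Int) :
    (PySem.List.enumerate p s).filter (fun q => q.2 == "N/A") = [] := by
  induction p generalizing s with
  | nil => simp [PySem.List.enumerate_nil]
  | cons x t ih =>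
    rw [PySem.List.enumerate_cons, List.filter_cons]
    have hx : x ≠ "N/A" := fun hc => hna (by simp [hc])
    have ht : "N/A" ∉ t := fun hc => hna (by simp [hc])
    simp [show ((x == "N/A") = false) from beq_eq_false_iff_ne.mpr hx, ih ht]

theorem main_eq (columns : List (String × List String)) (header : List String)
    (hpre : Pre_cleanDataset columns header) :
    cleanDataset columns header = cleanDataset_alt columns header := by
  have hdef : cleanDataset columns header = columns.foldl (stepA header) columns := rfl
  unfold Pre_cleanDataset preCheck at hpre
  rw [Bool.and_eq_true] at hpre
  obtain ⟨hnodup', hrest⟩ := hpre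
  have hnodup : (columns.map Prod.fst).Nodup := of_decide_eq_true hnodup'
  cases hP : columns.lookup "Positive" with
  | none =>
    rw [hdef, foldl_skip header columns columns (lookup_none _ _ hP)]
    simp only [cleanDataset_alt, hP]
  | some p =>
    rw [hP] at hrest
    obtain ⟨l1, l2, hcols, hno1⟩ := lookup_split columns "Positive" p hP
    have hno2 : ∀ kv ∈ l2, kv.1 ≠ "Positive" := by
      intro kv hkv
      have hnotin : "Positive" ∉ l2.map Prod.fst := by
        rw [hcols] at hnodup
        simp only [List.map_append, List.map_cons, List.nodup_append] at hnodup
        have h' := hnodup.2.1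
        simp only [List.nodup_cons] at h'
        exact h'.1
      intro hc
      exact hnotin (hc ▸ List.mem_map_of_mem hkv)
    by_cases hna : "N/A" ∈ p
    · -- real deletions happen: use the Pre_ shape facts
      have hcontains : p.contains "N/A" = true := by simpa using hna
      simp only [hcontains, Bool.not_true, Bool.false_or, Bool.and_eq_true] at hrest
      obtain ⟨⟨⟨⟨⟨⟨_, hd01⟩, hd02⟩, hd12⟩, hc0⟩, hc1⟩, hc2⟩ := hrest
      have d01 : header.getD 0 "" ≠ header.getD 1 "" := by simpa using hd01
      have d02 : header.getD 0 "" ≠ header.getD 2 "" := by simpa using hd02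
      have d12 : header.getD 1 "" ≠ header.getD 2 "" := by simpa using hd12
      obtain ⟨c0, e0, len0⟩ := colOK_spec _ _ _ hc0
      obtain ⟨c1, e1, len1⟩ := colOK_spec _ _ _ hc1
      obtain ⟨c2, e2, len2⟩ := colOK_spec _ _ _ hc2
      -- A side
      have hA : cleanDataset columns header =
          dictSet (dictSet (dictSet columns (header.getD 0 "") (sel c0 p))
            (header.getD 1 "") (sel c1 p)) (header.getD 2 "") (sel c2 p) := by
        rw [hdef]
        conv_lhs => rw [hcols]
        rw [List.foldl_append, List.foldl_cons]
        rw [foldl_skip header l1 _ hno1]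
        rw [← hcols]
        rw [show stepA header columns ("Positive", p) =
          (PySem.List.sorted (((PySem.List.enumerate p).filter (fun q => q.2 == "N/A")).map (fun q => q.1)) (fun i => i) true).foldl
            (step3 header) columns from by simp [stepA]]
        rw [sorted_rev_idx p, fold3 header d01 d02 d12]
        rw [foldl_skip header l2 _ hno2]
        have e1' : ∀ w, (dictSet columns (header.getD 0 "") w).lookup (header.getD 1 "") = some c1 :=
          fun w => by rw [lookup_dictSet_ne _ _ _ _ (Ne.symm d01)]; exact e1
        have e2' : ∀ w w1, (dictSet (dictSet columns (header.getD 0 "") w) (header.getD 1 "") w1).lookup (header.getD 2 "") = some c2 :=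
          fun w w1 => by
            rw [lookup_dictSet_ne _ _ _ _ (Ne.symm d12), lookup_dictSet_ne _ _ _ _ (Ne.symm d02)]; exact e2
        rw [dictModify_eq_dictSet _ _ _ c0 e0]
        rw [dictModify_eq_dictSet _ (header.getD 1 "") _ c1 (e1' _)]
        rw [dictModify_eq_dictSet _ (header.getD 2 "") _ c2 (e2' _ _)]
        rw [core p c0 len0, core p c1 len1, core p c2 len2]
      -- B side
      obtain ⟨p0, p1, p2⟩ := proj_sel c0 c1 c2 p len0 len1 len2
      have hB : cleanDataset_alt columns header =
          dictSet (dictSet (dictSet columns (header.getD 0 "") (sel c0 p))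
            (header.getD 1 "") (sel c1 p)) (header.getD 2 "") (sel c2 p) := by
        simp only [cleanDataset_alt, hP, if_pos hna]
        rw [e0, e1, e2]
        simp only [Option.getD_some]
        rw [p0, p1, p2]
      rw [hA, hB]
    · -- nothing to delete: both sides return columns unchanged
      have hA : cleanDataset columns header = columns := by
        rw [hdef]
        conv_lhs => rw [hcols]
        rw [List.foldl_append, List.foldl_cons]
        rw [foldl_skip header l1 _ hno1]
        rw [← hcols]
        rw [show stepA header columns ("Positive", p) =
          (PySem.List.sorted (((PySem.List.enumerate p).filter (fun q => q.2 == "N/A")).map (fun q => q.1)) (fun i => i) true).foldl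
            (step3 header) columns from by simp [stepA]]
        rw [filter_nil_of_no_na p hna 0]
        simp only [List.map_nil]
        rw [show PySem.List.sorted ([] : List Int) (fun i => i) true = [] from rfl]
        rw [List.foldl_nil]
        exact foldl_skip header l2 columns hno2
      have hB : cleanDataset_alt columns header = columns := by
        simp only [cleanDataset_alt, hP, if_neg hna]
      rw [hA, hB]

-- ===== VERDICT (by name: the statement is the Claim_ definition above) =====
theorem cleanDataset_spec : Claim_equal_cleanDataset := by
  intro columns header _ hpre
  unfold Spec_cleanDataset
  exact main_eq columns header hpre
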